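-- pv_equiv track=rewrite | github.com/k-harada/AtCoder | ABC/ABC212/E.py | solve
-- ===== SOURCE A (Python) =====
-- LARGE = 998244353
--
-- def solve(n, m, k, uv_list):
--     g = [[] for _ in range(n)]
--     for u, v in uv_list:
--         g[u - 1].append(v - 1)
--         g[v - 1].append(u - 1)
--
--     dp = [[0] * n for _ in range(k + 1)]
--     dp[0][0] = 1
--     for d in range(k):
--         sum_d = sum(dp[d]) % LARGE
--         for p in range(n):
--             dp[d + 1][p] = sum_d - dp[d][p]
--             for q in g[p]:
--                 dp[d + 1][p] -= dp[d][q]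
--             dp[d + 1][p] %= LARGE
--     return dp[-1][0]
-- ===== SOURCE B (Python) =====
-- LARGE = 998244353
--
--
-- def half_walks(n, d, uv_list):
--     # the vector M^d e0 for the (symmetric) step matrix M, kept as one rolling
--     # row; edges are scattered directly, no adjacency list is built
--     cur = [0] * n
--     cur[0] = 1
--     for _ in range(d):
--         s = sum(cur) % LARGE
--         nxt = [s - x for x in cur]
--         for u, v in uv_list:
--             nxt[u - 1] -= cur[v - 1]
--             nxt[v - 1] -= cur[u - 1]
--         cur = [x % LARGE for x in nxt]
--     return cur
--
--
-- def solve(n, m, k, uv_list):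
--     # meet in the middle: the step matrix is symmetric, so the closed length-k
--     # walk count is the inner product of the two half-length walk vectors
--     left = half_walks(n, k - k // 2, uv_list)
--     right = half_walks(n, k // 2, uv_list)
--     return sum(l * r for l, r in zip(left, right)) % LARGE
-- ===== Notes on version B (the rewrite author's own statement) =====
-- stated objective: alternative
-- what changed: B splits the k steps in two by a meet-in-the-middle argument: since the step matrix is symmetric, the answer is the inner product of the walk vectors after ceil(k/2) and floor(k/2) steps; each half keeps one rolling row updated by a node pass plus an edge-scatter pass over the raw edge list, with no adjacency list and no (k+1)-row dp table, and the result is assembled by a dot product instead of being read off a table.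
import Mathlib
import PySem

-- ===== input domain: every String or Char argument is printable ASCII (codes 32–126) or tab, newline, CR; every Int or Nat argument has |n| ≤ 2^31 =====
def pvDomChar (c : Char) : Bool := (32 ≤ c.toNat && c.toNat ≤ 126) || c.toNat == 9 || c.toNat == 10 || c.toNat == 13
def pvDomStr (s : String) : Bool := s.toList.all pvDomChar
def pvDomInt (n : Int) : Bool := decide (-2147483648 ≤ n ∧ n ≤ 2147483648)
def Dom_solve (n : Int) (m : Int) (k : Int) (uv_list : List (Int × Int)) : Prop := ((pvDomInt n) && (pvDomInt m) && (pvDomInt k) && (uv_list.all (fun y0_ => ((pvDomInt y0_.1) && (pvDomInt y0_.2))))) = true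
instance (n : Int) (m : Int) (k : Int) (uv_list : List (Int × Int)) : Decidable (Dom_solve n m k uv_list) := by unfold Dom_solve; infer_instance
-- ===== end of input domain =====

-- B replaces A's k-step dp table by meet-in-the-middle: the step matrix is symmetric, so
-- the answer is the inner product of the two half-length walk vectors, each kept as one
-- rolling row scattered over the raw edge list (objective: alternative, same cost).

-- Python list-index normalization (negative indices count from the end);
-- exact whenever -n ≤ i < n, which Pre_solve guarantees for every index used.
def pvIdx (n i : Int) : Nat := (if i < 0 then i + n else i).toNat

-- row[q] with Python indexing (q may be negative)
def pvRowAt (n : Int) (row : List Int) (q : Int) : Int := row.getD (pvIdx n q) 0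

-- ===== PORT A =====
-- g = [[] for _ in range(n)]; for u, v in uv_list: g[u-1].append(v-1); g[v-1].append(u-1)
def pvBuildG (n : Int) (uv : List (Int × Int)) : List (List Int) :=
  uv.foldl
    (fun g e =>
      (g.modify (pvIdx n (e.1 - 1)) (fun l => l ++ [e.2 - 1])).modify
        (pvIdx n (e.2 - 1)) (fun l => l ++ [e.1 - 1]))
    (List.replicate n.toNat [])

-- one d-iteration of A: dp[d+1][p] = (sum_d - dp[d][p] - Σ_{q∈g[p]} dp[d][q]) % LARGE
def pvStepA (n : Int) (g : List (List Int)) (row : List Int) : List Int :=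
  let s := row.sum % 998244353
  (List.range n.toNat).map (fun p =>
    ((g.getD p []).foldl (fun a q => a - pvRowAt n row q) (s - row.getD p 0)) % 998244353)

-- the filled dp table (dp0 has dp[0][0] = 1; each d-iteration fills row d+1)
def pvDpA (n : Int) (k : Int) (uv_list : List (Int × Int)) : List (List Int) :=
  (PySem.List.pyRange 0 k 1).foldl
    (fun dp d => dp.set (d.toNat + 1) (pvStepA n (pvBuildG n uv_list) (dp.getD d.toNat [])))
    ((List.replicate (k + 1).toNat (List.replicate n.toNat 0)).set 0
      ((List.replicate n.toNat 0).set 0 1))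

def solve (n : Int) (m : Int) (k : Int) (uv_list : List (Int × Int)) : Int :=
  ((pvDpA n k uv_list).getD ((pvDpA n k uv_list).length - 1) []).getD 0 0

-- ===== PORT B =====
-- one iteration of half_walks: nxt = [s - x for x in cur]; scatter over edges; mod pass
def pvStepB (n : Int) (uv : List (Int × Int)) (row : List Int) : List Int :=
  let s := row.sum % 998244353
  let nxt0 := row.map (fun x => s - x)
  let nxt := uv.foldl
    (fun nxt e =>
      (nxt.modify (pvIdx n (e.1 - 1)) (fun x => x - pvRowAt n row (e.2 - 1))).modify
        (pvIdx n (e.2 - 1)) (fun x => x - pvRowAt n row (e.1 - 1)))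
    nxt0
  nxt.map (fun x => x % 998244353)

-- half_walks(n, d, uv_list)
def pvHalf (n : Int) (d : Nat) (uv : List (Int × Int)) : List Int :=
  (List.range d).foldl (fun cur _ => pvStepB n uv cur) ((List.replicate n.toNat 0).set 0 1)

-- sum(l * r for l, r in zip(left, right)) % LARGE, with left/right the two halves
def solve_alt (n : Int) (m : Int) (k : Int) (uv_list : List (Int × Int)) : Int :=
  (List.zipWith (fun a b => a * b)
      (pvHalf n (k - PySem.Int.floordiv k 2).toNat uv_list)
      (pvHalf n (PySem.Int.floordiv k 2).toNat uv_list)).sum % 998244353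

-- ===== PRECONDITION & SPEC =====
-- Exactly where Python A returns: n ≥ 1 and k ≥ 0 (else an IndexError on dp), and every
-- edge endpoint must give an in-range Python index u-1 ∈ [-n, n-1] (else IndexError on g).
def Pre_solve (n : Int) (m : Int) (k : Int) (uv_list : List (Int × Int)) : Prop :=
  1 ≤ n ∧ 0 ≤ k ∧
    ∀ e ∈ uv_list, 1 - n ≤ e.1 ∧ e.1 ≤ n ∧ 1 - n ≤ e.2 ∧ e.2 ≤ n
instance (n : Int) (m : Int) (k : Int) (uv_list : List (Int × Int)) : Decidable (Pre_solve n m k uv_list) := by unfold Pre_solve; infer_instance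

def pvWitness_solve : Int × Int × Int × (List (Int × Int)) := (3, 2, 2, [(1, 2), (2, 3)])

def Spec_solve (n : Int) (m : Int) (k : Int) (uv_list : List (Int × Int)) (out : Int) : Prop := out = solve_alt n m k uv_list
instance (n : Int) (m : Int) (k : Int) (uv_list : List (Int × Int)) (out : Int) : Decidable (Spec_solve n m k uv_list out) := by unfold Spec_solve; infer_instance

-- ===== CLAIM (what is proved, stated in full; the proofs are below) =====
def Claim_equal_solve : Prop := ∀ (n : Int) (m : Int) (k : Int) (uv_list : List (Int × Int)), Dom_solve n m k uv_list → Pre_solve n m k uv_list → Spec_solve n m k uv_list (solve n m k uv_list)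

-- ===== LEMMAS AND PROOFS =====

-- interpretation of a list matrix / row over ZMod 998244353
def pvToM (n : Int) (a : List (List Int)) :
    Matrix (Fin n.toNat) (Fin n.toNat) (ZMod 998244353) :=
  Matrix.of fun i j => (((a.getD i.1 []).getD j.1 0 : Int) : ZMod 998244353)

def pvToV (n : Int) (row : List Int) : Fin n.toNat → ZMod 998244353 :=
  fun i => ((row.getD i.1 0 : Int) : ZMod 998244353)

-- the step matrix, as a proof-level list matrix: entry (p,q) is 1 - [p=q] - multiplicity
def pvMat0 (n : Int) : List (List Int) :=
  (List.range n.toNat).map (fun p =>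
    (List.range n.toNat).map (fun q => if p ≠ q then (1 : Int) else 0))

def pvMatEdges (n : Int) (uv : List (Int × Int)) : List (List Int) :=
  uv.foldl
    (fun mat e =>
      (mat.modify (pvIdx n (e.1 - 1))
          (fun r => r.modify (pvIdx n (e.2 - 1)) (fun x => (x - 1) % 998244353))).modify
        (pvIdx n (e.2 - 1))
        (fun r => r.modify (pvIdx n (e.1 - 1)) (fun x => (x - 1) % 998244353)))
    (pvMat0 n)

-- the per-node contribution of the edge list to position p, as the edge folds scatter it
def pvContrib (n : Int) (row : List Int) (uv : List (Int × Int)) (p : Nat) : Int :=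
  (uv.map (fun e =>
    (if pvIdx n (e.1 - 1) = p then pvRowAt n row (e.2 - 1) else 0) +
    (if pvIdx n (e.2 - 1) = p then pvRowAt n row (e.1 - 1) else 0))).sum

theorem pv_foldl_sub (f : Int → Int) (l : List Int) (b : Int) :
    l.foldl (fun a q => a - f q) b = b - (l.map f).sum := by
  induction l generalizing b with
  | nil => simp
  | cons x xs ih => simp [ih]; ring

theorem pv_getD_modify {α : Type} (l : List α) (i p : Nat) (f : α → α) (d : α)
    (hp : p < l.length) :
    (l.modify i f).getD p d = if i = p then f (l.getD p d) else l.getD p d := by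
  simp [List.getD_eq_getElem?_getD, List.getElem?_modify, List.getElem?_eq_getElem hp]

theorem pv_buildG_sum (n : Int) (row : List Int) (uv : List (Int × Int))
    (g0 : List (List Int)) (p : Nat) (hp : p < g0.length) :
    (((uv.foldl
        (fun g e =>
          (g.modify (pvIdx n (e.1 - 1)) (fun l => l ++ [e.2 - 1])).modify
            (pvIdx n (e.2 - 1)) (fun l => l ++ [e.1 - 1]))
        g0).getD p []).map (pvRowAt n row)).sum
      = ((g0.getD p []).map (pvRowAt n row)).sum + pvContrib n row uv p := by
  induction uv generalizing g0 with
  | nil => simp [pvContrib]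
  | cons e es ih =>
    simp only [List.foldl_cons]
    rw [ih _ (by simp [hp])]
    rw [pv_getD_modify _ _ _ _ _ (by simp [hp]), pv_getD_modify _ _ _ _ _ hp]
    simp only [pvContrib, List.map_cons, List.sum_cons]
    split <;> split <;> simp <;> ring

-- B's scatter pass, elementwise
theorem pv_scatter_len (n : Int) (row : List Int) (uv : List (Int × Int)) (nxt : List Int) :
    (uv.foldl
      (fun nxt e =>
        (nxt.modify (pvIdx n (e.1 - 1)) (fun x => x - pvRowAt n row (e.2 - 1))).modify
          (pvIdx n (e.2 - 1)) (fun x => x - pvRowAt n row (e.1 - 1)))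
      nxt).length = nxt.length := by
  induction uv generalizing nxt with
  | nil => rfl
  | cons e es ih => simp [ih]

theorem pv_scatter_get (n : Int) (row : List Int) (uv : List (Int × Int))
    (nxt : List Int) (p : Nat) (hp : p < nxt.length) :
    (uv.foldl
      (fun nxt e =>
        (nxt.modify (pvIdx n (e.1 - 1)) (fun x => x - pvRowAt n row (e.2 - 1))).modify
          (pvIdx n (e.2 - 1)) (fun x => x - pvRowAt n row (e.1 - 1)))
      nxt).getD p 0 = nxt.getD p 0 - pvContrib n row uv p := by
  induction uv generalizing nxt with
  | nil => simp [pvContrib]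
  | cons e es ih =>
    simp only [List.foldl_cons]
    rw [ih _ (by simp [hp])]
    rw [pv_getD_modify _ _ _ _ _ (by simp [hp]), pv_getD_modify _ _ _ _ _ hp]
    simp only [pvContrib, List.map_cons, List.sum_cons]
    split <;> split <;> simp <;> ring

-- A's step and B's step compute the same row
theorem pv_step_eq (n : Int) (uv : List (Int × Int)) (row : List Int)
    (hrow : row.length = n.toNat) :
    pvStepA n (pvBuildG n uv) row = pvStepB n uv row := by
  apply List.ext_getElem
  · simp [pvStepA, pvStepB, pv_scatter_len, hrow]
  · intro p h1 h2
    simp only [pvStepA, pvStepB]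
    simp only [List.getElem_map, List.getElem_range]
    have hp : p < n.toNat := by simpa [pvStepA] using h1
    have hgd : ((pvBuildG n uv).getD p []) =
        (uv.foldl
          (fun g e =>
            (g.modify (pvIdx n (e.1 - 1)) (fun l => l ++ [e.2 - 1])).modify
              (pvIdx n (e.2 - 1)) (fun l => l ++ [e.1 - 1]))
          (List.replicate n.toNat [])).getD p [] := rfl
    rw [pv_foldl_sub]
    rw [hgd, pv_buildG_sum n row uv _ p (by simp [hp])]
    have hlen0 : (row.map (fun x => row.sum % 998244353 - x)).length = n.toNat := by
      simp [hrow]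
    have hget := pv_scatter_get n row uv (row.map (fun x => row.sum % 998244353 - x)) p
      (by rw [hlen0]; exact hp)
    have hsl := pv_scatter_len n row uv (row.map (fun x => row.sum % 998244353 - x))
    rw [← List.getD_eq_getElem _ 0 (by rw [hsl, hlen0]; exact hp)]
    rw [hget]
    have : (row.map (fun x => row.sum % 998244353 - x)).getD p 0
        = row.sum % 998244353 - row.getD p 0 := by
      rw [List.getD_eq_getElem _ _ (by rw [hlen0]; exact hp)]
      rw [List.getD_eq_getElem _ _ (by rw [hrow]; exact hp)]
      simp
    rw [this]
    have hrep : ((List.replicate n.toNat ([] : List Int)).getD p []) = [] := by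
      simp [List.getD_eq_getElem?_getD]
    rw [hrep]
    simp only [List.map_nil, List.sum_nil, zero_add]

-- casts
theorem pv_cast_mod (a : Int) : ((a % 998244353 : Int) : ZMod 998244353) = (a : ZMod 998244353) := by
  have h : a % (998244353 : Int) ≡ a [ZMOD (998244353 : ℕ)] := by
    show a % (998244353 : Int) % _ = a % _
    push_cast
    rw [Int.emod_emod_of_dvd a dvd_rfl]
  exact_mod_cast (ZMod.intCast_eq_intCast_iff _ _ _).mpr h

theorem pv_zmod_to_mod (a b : Int) (h : (a : ZMod 998244353) = (b : ZMod 998244353)) :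
    a % 998244353 = b % 998244353 := by
  have := (ZMod.intCast_eq_intCast_iff a b 998244353).mp h
  simpa using this

theorem pv_sum_range_cast (f : Nat → Int) (n : Nat) :
    (((List.range n).map f).sum : ZMod 998244353)
      = ∑ i ∈ Finset.range n, ((f i : Int) : ZMod 998244353) := by
  induction n with
  | zero => simp
  | succ n ih =>
    rw [List.range_succ, Finset.sum_range_succ, List.map_append, List.sum_append,
      Int.cast_add, ih]
    simp

theorem pv_list_sum_getD (l : List Int) :
    l.sum = ((List.range l.length).map (fun i => l.getD i 0)).sum := by
  induction l with
  | nil => simp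
  | cons x xs ih =>
    have hmap : (List.range xs.length).map (fun i => (x :: xs).getD (i+1) 0)
        = (List.range xs.length).map (fun i => xs.getD i 0) := by
      apply List.map_congr_left; intro i _; simp [List.getD]
    calc (x :: xs).sum = x + xs.sum := by simp
    _ = x + ((List.range xs.length).map (fun i => xs.getD i 0)).sum := by rw [ih]
    _ = _ := by
        rw [List.length_cons, List.range_succ_eq_map]
        simp only [List.map_cons, List.sum_cons, List.map_map]
        rw [← hmap]
        rfl

-- a zip-product sum as an indexed sum
theorem pv_zip_sum (l r : List Int) :
    (List.zipWith (fun a b => a * b) l r).sum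
      = ((List.range (min l.length r.length)).map (fun i => l.getD i 0 * r.getD i 0)).sum := by
  induction l generalizing r with
  | nil => simp
  | cons x xs ih =>
    cases r with
    | nil => simp
    | cons y ys =>
      have hmap : (List.range (min xs.length ys.length)).map
            (fun i => (x :: xs).getD (i+1) 0 * (y :: ys).getD (i+1) 0)
          = (List.range (min xs.length ys.length)).map (fun i => xs.getD i 0 * ys.getD i 0) := by
        apply List.map_congr_left; intro i _; simp [List.getD]
      calc (List.zipWith (fun a b => a * b) (x :: xs) (y :: ys)).sum
          = x * y + (List.zipWith (fun a b => a * b) xs ys).sum := by simp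
      _ = x * y + ((List.range (min xs.length ys.length)).map
            (fun i => xs.getD i 0 * ys.getD i 0)).sum := by rw [ih]
      _ = _ := by
          rw [List.length_cons, List.length_cons, Nat.succ_min_succ, List.range_succ_eq_map]
          simp only [List.map_cons, List.sum_cons, List.map_map]
          rw [← hmap]
          rfl

-- getD of a row-map over range
theorem pv_getD_map_range {α : Type} (f : Nat → α) (n i : Nat) (d : α) (hi : i < n) :
    ((List.range n).map f).getD i d = f i := by
  rw [List.getD_eq_getElem _ _ (by simp [hi])]
  simp

-- shape invariant
def pvShape (n : Int) (mat : List (List Int)) : Prop :=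
  mat.length = n.toNat ∧ ∀ i (h : i < mat.length), mat[i].length = n.toNat

theorem pv_shape_modify (n : Int) (mat : List (List Int)) (i j : Nat) (f : Int → Int)
    (h : pvShape n mat) :
    pvShape n (mat.modify i (fun r => r.modify j f)) := by
  obtain ⟨h1, h2⟩ := h
  refine ⟨by simpa using h1, ?_⟩
  intro t ht
  rw [List.length_modify] at ht
  rw [List.getElem_modify]
  split
  · rw [List.length_modify]; exact h2 t ht
  · exact h2 t ht

-- a single python "mat[i][j] = (mat[i][j] - 1) % LARGE", seen through pvToM
theorem pv_update_interp (n : Int) (mat : List (List Int)) (i j : Nat)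
    (h : pvShape n mat) (hj : j < n.toNat) (p q : Fin n.toNat) :
    pvToM n (mat.modify i (fun r => r.modify j (fun x => (x - 1) % 998244353))) p q
      = pvToM n mat p q - (if i = p.1 ∧ j = q.1 then 1 else 0) := by
  obtain ⟨h1, h2⟩ := h
  have hp : p.1 < mat.length := by rw [h1]; exact p.isLt
  show ((((mat.modify i _).getD p.1 []).getD q.1 0 : Int) : ZMod 998244353) = _
  rw [pv_getD_modify _ _ _ _ _ hp]
  by_cases hip : i = p.1
  · rw [if_pos hip]
    have hrow : (mat.getD p.1 []).length = n.toNat := by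
      rw [List.getD_eq_getElem _ _ hp]; exact h2 p.1 hp
    rw [pv_getD_modify _ _ _ _ _ (by rw [hrow]; exact q.isLt)]
    by_cases hjq : j = q.1
    · rw [if_pos hjq, pv_cast_mod]
      simp only [hip, hjq, and_self, if_pos]
      push_cast
      rfl
    · rw [if_neg hjq]
      simp only [hip, hjq, and_false, if_false]
      simp [pvToM]
  · rw [if_neg hip]
    simp only [hip, false_and, if_false]
    simp [pvToM]

theorem pv_sum_delta (n' : Nat) (v : Fin n' → ZMod 998244353) (j : Nat) (hj : j < n') :
    (∑ q : Fin n', (if j = q.1 then (1 : ZMod 998244353) else 0) * v q) = v ⟨j, hj⟩ := by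
  rw [Finset.sum_eq_single ⟨j, hj⟩]
  · simp
  · intro b _ hb
    have : j ≠ b.1 := by
      intro hc; exact hb (Fin.ext hc.symm)
    simp [this]
  · intro hc; exact absurd (Finset.mem_univ _) hc

-- effect of the whole edge fold on the p-row inner product
theorem pv_edgefold_sum (n : Int) (row : List Int) (uv : List (Int × Int))
    (hok : ∀ e ∈ uv, 1 - n ≤ e.1 ∧ e.1 ≤ n ∧ 1 - n ≤ e.2 ∧ e.2 ≤ n)
    (hn : 1 ≤ n)
    (mat0 : List (List Int)) (h0 : pvShape n mat0) (p : Fin n.toNat) :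
    (∑ q : Fin n.toNat,
        pvToM n (uv.foldl
          (fun mat e =>
            (mat.modify (pvIdx n (e.1 - 1))
                (fun r => r.modify (pvIdx n (e.2 - 1)) (fun x => (x - 1) % 998244353))).modify
              (pvIdx n (e.2 - 1))
              (fun r => r.modify (pvIdx n (e.1 - 1)) (fun x => (x - 1) % 998244353)))
          mat0) p q * pvToV n row q)
      = (∑ q : Fin n.toNat, pvToM n mat0 p q * pvToV n row q)
        - ((pvContrib n row uv p.1 : Int) : ZMod 998244353) := by
  induction uv generalizing mat0 with
  | nil => simp [pvContrib]
  | cons e es ih =>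
    have he := hok e (by simp)
    have hi1 : pvIdx n (e.1 - 1) < n.toNat := by unfold pvIdx; split <;> omega
    have hj1 : pvIdx n (e.2 - 1) < n.toNat := by unfold pvIdx; split <;> omega
    simp only [List.foldl_cons]
    rw [ih (fun e' he' => hok e' (by simp [he'])) _
      (pv_shape_modify n _ _ _ _ (pv_shape_modify n _ _ _ _ h0))]
    have hd1 : (∑ q : Fin n.toNat,
        (if pvIdx n (e.1 - 1) = p.1 ∧ pvIdx n (e.2 - 1) = q.1 then (1 : ZMod 998244353) else 0)
          * pvToV n row q)
        = (if pvIdx n (e.1 - 1) = p.1 then pvToV n row ⟨pvIdx n (e.2 - 1), hj1⟩ else 0) := by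
      by_cases hp1 : pvIdx n (e.1 - 1) = p.1
      · rw [if_pos hp1]
        simp only [hp1, true_and]
        exact pv_sum_delta _ _ _ hj1
      · rw [if_neg hp1]
        apply Finset.sum_eq_zero
        intro q _
        rw [if_neg (fun hc => hp1 hc.1), zero_mul]
    have hd2 : (∑ q : Fin n.toNat,
        (if pvIdx n (e.2 - 1) = p.1 ∧ pvIdx n (e.1 - 1) = q.1 then (1 : ZMod 998244353) else 0)
          * pvToV n row q)
        = (if pvIdx n (e.2 - 1) = p.1 then pvToV n row ⟨pvIdx n (e.1 - 1), hi1⟩ else 0) := by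
      by_cases hp2 : pvIdx n (e.2 - 1) = p.1
      · rw [if_pos hp2]
        simp only [hp2, true_and]
        exact pv_sum_delta _ _ _ hi1
      · rw [if_neg hp2]
        apply Finset.sum_eq_zero
        intro q _
        rw [if_neg (fun hc => hp2 hc.1), zero_mul]
    have hA : ∀ q : Fin n.toNat,
        pvToM n ((mat0.modify (pvIdx n (e.1 - 1))
            (fun r => r.modify (pvIdx n (e.2 - 1)) (fun x => (x - 1) % 998244353))).modify
          (pvIdx n (e.2 - 1))
          (fun r => r.modify (pvIdx n (e.1 - 1)) (fun x => (x - 1) % 998244353))) p q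
        = pvToM n mat0 p q
          - (if pvIdx n (e.1 - 1) = p.1 ∧ pvIdx n (e.2 - 1) = q.1 then 1 else 0)
          - (if pvIdx n (e.2 - 1) = p.1 ∧ pvIdx n (e.1 - 1) = q.1 then 1 else 0) := by
      intro q
      rw [pv_update_interp n _ _ _ (pv_shape_modify n _ _ _ _ h0) hi1,
          pv_update_interp n _ _ _ h0 hj1]
    have hstep : (∑ q : Fin n.toNat,
        pvToM n ((mat0.modify (pvIdx n (e.1 - 1))
            (fun r => r.modify (pvIdx n (e.2 - 1)) (fun x => (x - 1) % 998244353))).modify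
          (pvIdx n (e.2 - 1))
          (fun r => r.modify (pvIdx n (e.1 - 1)) (fun x => (x - 1) % 998244353))) p q
          * pvToV n row q)
        = (∑ q : Fin n.toNat, pvToM n mat0 p q * pvToV n row q)
          - (if pvIdx n (e.1 - 1) = p.1 then pvToV n row ⟨pvIdx n (e.2 - 1), hj1⟩ else 0)
          - (if pvIdx n (e.2 - 1) = p.1 then pvToV n row ⟨pvIdx n (e.1 - 1), hi1⟩ else 0) := by
      calc (∑ q : Fin n.toNat, _ * pvToV n row q)
          = ∑ q : Fin n.toNat,
            ((pvToM n mat0 p q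
              - (if pvIdx n (e.1 - 1) = p.1 ∧ pvIdx n (e.2 - 1) = q.1 then 1 else 0)
              - (if pvIdx n (e.2 - 1) = p.1 ∧ pvIdx n (e.1 - 1) = q.1 then 1 else 0))
              * pvToV n row q) := by
            apply Finset.sum_congr rfl; intro q _; rw [hA]
      _ = _ := by
            simp only [sub_mul, Finset.sum_sub_distrib, hd1, hd2]
    rw [hstep]
    simp only [pvContrib, List.map_cons, List.sum_cons, Int.cast_add,
      apply_ite (fun x : Int => ((x : ZMod 998244353))), Int.cast_zero]
    have hv1 : pvToV n row ⟨pvIdx n (e.2 - 1), hj1⟩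
        = ((pvRowAt n row (e.2 - 1) : Int) : ZMod 998244353) := rfl
    have hv2 : pvToV n row ⟨pvIdx n (e.1 - 1), hi1⟩
        = ((pvRowAt n row (e.1 - 1) : Int) : ZMod 998244353) := rfl
    rw [hv1, hv2]
    ring

theorem pv_mat0_shape (n : Int) : pvShape n (pvMat0 n) := by
  constructor
  · simp [pvMat0]
  · intro i h
    simp only [pvMat0, List.length_map, List.length_range] at h ⊢
    rw [List.getElem_map]
    simp

theorem pv_mat0_entry (n : Int) (p q : Fin n.toNat) :
    pvToM n (pvMat0 n) p q = 1 - (if p.1 = q.1 then (1 : ZMod 998244353) else 0) := by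
  show (((pvMat0 n).getD p.1 []).getD q.1 0 : ZMod 998244353) = _
  unfold pvMat0
  rw [pv_getD_map_range _ _ _ _ p.isLt, pv_getD_map_range _ _ _ _ q.isLt]
  by_cases h : p.1 = q.1 <;> simp [h]

theorem pv_mat0_sum (n : Int) (row : List Int) (p : Fin n.toNat) :
    (∑ q : Fin n.toNat, pvToM n (pvMat0 n) p q * pvToV n row q)
      = (∑ q : Fin n.toNat, pvToV n row q) - pvToV n row p := by
  calc _ = ∑ q : Fin n.toNat,
        ((1 - (if p.1 = q.1 then (1 : ZMod 998244353) else 0)) * pvToV n row q) := by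
        apply Finset.sum_congr rfl; intro q _; rw [pv_mat0_entry]
  _ = _ := by
      simp only [sub_mul, one_mul, Finset.sum_sub_distrib]
      congr 1
      exact pv_sum_delta _ _ _ p.isLt

-- the step matrix is symmetric
theorem pv_matEdges_symm (n : Int) (uv : List (Int × Int))
    (hok : ∀ e ∈ uv, 1 - n ≤ e.1 ∧ e.1 ≤ n ∧ 1 - n ≤ e.2 ∧ e.2 ≤ n)
    (p q : Fin n.toNat) :
    pvToM n (pvMatEdges n uv) p q = pvToM n (pvMatEdges n uv) q p := by
  unfold pvMatEdges
  have main : ∀ (es : List (Int × Int)) (mat0 : List (List Int)),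
      (∀ e ∈ es, 1 - n ≤ e.1 ∧ e.1 ≤ n ∧ 1 - n ≤ e.2 ∧ e.2 ≤ n) →
      pvShape n mat0 →
      (∀ a b : Fin n.toNat, pvToM n mat0 a b = pvToM n mat0 b a) →
      ∀ a b : Fin n.toNat,
        pvToM n (es.foldl
          (fun mat e =>
            (mat.modify (pvIdx n (e.1 - 1))
                (fun r => r.modify (pvIdx n (e.2 - 1)) (fun x => (x - 1) % 998244353))).modify
              (pvIdx n (e.2 - 1))
              (fun r => r.modify (pvIdx n (e.1 - 1)) (fun x => (x - 1) % 998244353)))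
          mat0) a b
        = pvToM n (es.foldl
          (fun mat e =>
            (mat.modify (pvIdx n (e.1 - 1))
                (fun r => r.modify (pvIdx n (e.2 - 1)) (fun x => (x - 1) % 998244353))).modify
              (pvIdx n (e.2 - 1))
              (fun r => r.modify (pvIdx n (e.1 - 1)) (fun x => (x - 1) % 998244353)))
          mat0) b a := by
    intro es
    induction es with
    | nil => intro mat0 _ _ hsym a b; exact hsym a b
    | cons e es ih =>
      intro mat0 hok0 hsh hsym a b
      have he := hok0 e (by simp)
      have hi1 : pvIdx n (e.1 - 1) < n.toNat := by unfold pvIdx; split <;> omega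
      have hj1 : pvIdx n (e.2 - 1) < n.toNat := by unfold pvIdx; split <;> omega
      simp only [List.foldl_cons]
      apply ih _ (fun e' he' => hok0 e' (by simp [he']))
        (pv_shape_modify n _ _ _ _ (pv_shape_modify n _ _ _ _ hsh))
      intro a' b'
      rw [pv_update_interp n _ _ _ (pv_shape_modify n _ _ _ _ hsh) hi1,
          pv_update_interp n _ _ _ hsh hj1,
          pv_update_interp n _ _ _ (pv_shape_modify n _ _ _ _ hsh) hi1,
          pv_update_interp n _ _ _ hsh hj1]
      rw [hsym a' b']
      have hc1 : (pvIdx n (e.1 - 1) = a'.1 ∧ pvIdx n (e.2 - 1) = b'.1)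
          ↔ (pvIdx n (e.2 - 1) = b'.1 ∧ pvIdx n (e.1 - 1) = a'.1) := by tauto
      have hc2 : (pvIdx n (e.2 - 1) = a'.1 ∧ pvIdx n (e.1 - 1) = b'.1)
          ↔ (pvIdx n (e.1 - 1) = b'.1 ∧ pvIdx n (e.2 - 1) = a'.1) := by tauto
      rw [if_congr hc1 rfl rfl, if_congr hc2 rfl rfl]
      ring
  have hsym0 : ∀ a b : Fin n.toNat, pvToM n (pvMat0 n) a b = pvToM n (pvMat0 n) b a := by
    intro a b
    rw [pv_mat0_entry, pv_mat0_entry]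
    by_cases h : a.1 = b.1
    · rw [if_pos h, if_pos h.symm]
    · rw [if_neg h, if_neg (fun hc => h hc.symm)]
  exact main uv (pvMat0 n) hok (pv_mat0_shape n) hsym0 p q

-- A's step is multiplication by the step matrix, over ZMod 998244353
theorem pv_stepA_interp (n : Int) (uv : List (Int × Int)) (row : List Int)
    (hrow : row.length = n.toNat) (hn : 1 ≤ n)
    (hok : ∀ e ∈ uv, 1 - n ≤ e.1 ∧ e.1 ≤ n ∧ 1 - n ≤ e.2 ∧ e.2 ≤ n) :
    pvToV n (pvStepA n (pvBuildG n uv) row)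
      = (pvToM n (pvMatEdges n uv)).mulVec (pvToV n row) := by
  funext p
  have hp := p.isLt
  show (((pvStepA n (pvBuildG n uv) row).getD p.1 0 : Int) : ZMod 998244353) = _
  unfold pvStepA
  rw [pv_getD_map_range _ _ _ _ hp]
  rw [pv_foldl_sub]
  have hgd : ((pvBuildG n uv).getD p.1 []) =
      (uv.foldl
        (fun g e =>
          (g.modify (pvIdx n (e.1 - 1)) (fun l => l ++ [e.2 - 1])).modify
            (pvIdx n (e.2 - 1)) (fun l => l ++ [e.1 - 1]))
        (List.replicate n.toNat [])).getD p.1 [] := rfl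
  rw [hgd, pv_buildG_sum n row uv _ p.1 (by simp [hp])]
  have hrep : ((List.replicate n.toNat ([] : List Int)).getD p.1 []) = [] := by
    simp [List.getD_eq_getElem?_getD]
  rw [hrep]
  simp only [List.map_nil, List.sum_nil, zero_add]
  rw [pv_cast_mod]
  push_cast
  rw [pv_cast_mod]
  rw [Matrix.mulVec, dotProduct]
  unfold pvMatEdges
  rw [pv_edgefold_sum n row uv hok hn _ (pv_mat0_shape n) p]
  rw [pv_mat0_sum n row p]
  have hsum : ((row.sum : Int) : ZMod 998244353) = ∑ q : Fin n.toNat, pvToV n row q := by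
    rw [pv_list_sum_getD row, pv_sum_range_cast, hrow,
      ← Fin.sum_univ_eq_sum_range (fun i => ((row.getD i 0 : Int) : ZMod 998244353))]
    rfl
  rw [hsum]
  have hgetp : ((row.getD p.1 0 : Int) : ZMod 998244353) = pvToV n row p := rfl
  rw [hgetp]

-- iterate of A's step
def pvIterA (n : Int) (uv : List (Int × Int)) (row0 : List Int) (j : Nat) : List Int :=
  (List.range j).foldl (fun r _ => pvStepA n (pvBuildG n uv) r) row0

theorem pv_stepA_len (n : Int) (g : List (List Int)) (row : List Int) :
    (pvStepA n g row).length = n.toNat := by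
  simp [pvStepA]

theorem pvIterA_len (n : Int) (uv : List (Int × Int)) (row0 : List Int) (j : Nat)
    (h0 : row0.length = n.toNat) : (pvIterA n uv row0 j).length = n.toNat := by
  induction j with
  | zero => exact h0
  | succ j ih =>
    rw [pvIterA, List.range_succ, List.foldl_append]
    simp [pv_stepA_len]

theorem pv_iterA_interp (n : Int) (uv : List (Int × Int)) (row0 : List Int)
    (h0 : row0.length = n.toNat) (hn : 1 ≤ n)
    (hok : ∀ e ∈ uv, 1 - n ≤ e.1 ∧ e.1 ≤ n ∧ 1 - n ≤ e.2 ∧ e.2 ≤ n) (j : Nat) :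
    pvToV n (pvIterA n uv row0 j)
      = ((pvToM n (pvMatEdges n uv)) ^ j).mulVec (pvToV n row0) := by
  induction j with
  | zero => simp [pvIterA]
  | succ j ih =>
    have hstep : pvIterA n uv row0 (j + 1) = pvStepA n (pvBuildG n uv) (pvIterA n uv row0 j) := by
      rw [pvIterA, List.range_succ, List.foldl_append, List.foldl_cons, List.foldl_nil]
      rfl
    rw [hstep, pv_stepA_interp n uv _ (pvIterA_len n uv row0 j h0) hn hok, ih,
      Matrix.mulVec_mulVec, ← pow_succ']

-- B's pvHalf is the same iterate
theorem pv_half_eq_iter (n : Int) (uv : List (Int × Int)) (d : Nat) :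
    pvHalf n d uv = pvIterA n uv ((List.replicate n.toNat 0).set 0 1) d := by
  induction d with
  | zero => rfl
  | succ d ih =>
    rw [pvHalf, List.range_succ, List.foldl_append, List.foldl_cons, List.foldl_nil]
    have hstep : pvIterA n uv ((List.replicate n.toNat 0).set 0 1) (d + 1)
        = pvStepA n (pvBuildG n uv) (pvIterA n uv ((List.replicate n.toNat 0).set 0 1) d) := by
      rw [pvIterA, List.range_succ, List.foldl_append, List.foldl_cons, List.foldl_nil]
      rfl
    rw [hstep, pv_step_eq n uv _ (pvIterA_len n uv _ d (by simp))]
    rw [show (List.range d).foldl (fun cur _ => pvStepB n uv cur)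
        ((List.replicate n.toNat 0).set 0 1) = pvHalf n d uv from rfl, ih]

-- dp-table reduction: row j of the table is the j-th iterate
theorem pv_table (n : Int) (uv : List (Int × Int)) (K : Nat) (row0 : List Int)
    (j : Nat) (hj : j ≤ K) :
    ((List.range j).foldl
        (fun dp d => dp.set (d + 1) (pvStepA n (pvBuildG n uv) (dp.getD d [])))
        ((List.replicate (K + 1) (List.replicate n.toNat 0)).set 0 row0)).length = K + 1
    ∧ ((List.range j).foldl
        (fun dp d => dp.set (d + 1) (pvStepA n (pvBuildG n uv) (dp.getD d [])))
        ((List.replicate (K + 1) (List.replicate n.toNat 0)).set 0 row0)).getD j []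
      = pvIterA n uv row0 j := by
  induction j with
  | zero =>
    constructor
    · simp
    · rw [List.range_zero, List.foldl_nil, pvIterA, List.range_zero, List.foldl_nil]
      rw [List.getD_eq_getElem _ _ (by simp)]
      simp
  | succ j ih =>
    obtain ⟨hl, hg⟩ := ih (Nat.le_of_succ_le hj)
    rw [List.range_succ, List.foldl_append, List.foldl_cons, List.foldl_nil]
    constructor
    · rw [List.length_set]; exact hl
    · rw [hg]
      rw [List.getD_eq_getElem _ _ (by rw [List.length_set, hl]; omega)]
      rw [List.getElem_set_self (by rw [List.length_set, hl]; omega)]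
      conv_rhs => rw [pvIterA, List.range_succ, List.foldl_append, List.foldl_cons, List.foldl_nil]
      rw [pvIterA]

-- every entry of an iterate is its own residue mod 998244353
theorem pv_iterA_canon (n : Int) (uv : List (Int × Int)) (j : Nat) (i : Nat) :
    ((pvIterA n uv ((List.replicate n.toNat 0).set 0 1) j).getD i 0) % 998244353
      = (pvIterA n uv ((List.replicate n.toNat 0).set 0 1) j).getD i 0 := by
  cases j with
  | zero =>
    have h00 : pvIterA n uv ((List.replicate n.toNat 0).set 0 1) 0
        = (List.replicate n.toNat (0:Int)).set 0 1 := by simp [pvIterA]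
    rw [h00]
    by_cases hi : i < (((List.replicate n.toNat (0:Int)).set 0 1)).length
    · rw [List.getD_eq_getElem _ _ hi]
      rw [List.getElem_set]
      split
      · norm_num
      · simp only [List.getElem_replicate]
        norm_num
    · rw [List.getD_eq_default _ _ (by omega)]
      norm_num
  | succ j =>
    rw [pvIterA, List.range_succ, List.foldl_append, List.foldl_cons, List.foldl_nil]
    set r := (List.range j).foldl (fun r _ => pvStepA n (pvBuildG n uv) r)
      ((List.replicate n.toNat (0:Int)).set 0 1)
    by_cases hi : i < n.toNat
    · show ((pvStepA n (pvBuildG n uv) r).getD i 0) % 998244353 = _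
      unfold pvStepA
      rw [pv_getD_map_range _ _ _ _ hi]
      rw [Int.emod_emod_of_dvd _ dvd_rfl]
    · show ((pvStepA n (pvBuildG n uv) r).getD i 0) % 998244353 = _
      rw [List.getD_eq_default _ _ (by rw [pv_stepA_len]; omega)]
      norm_num

-- the start vector interpreted
theorem pv_v0_interp (n : Int) (q : Fin n.toNat) :
    pvToV n ((List.replicate n.toNat 0).set 0 1) q
      = if q.1 = 0 then 1 else 0 := by
  show ((((List.replicate n.toNat (0:Int)).set 0 1).getD q.1 0 : Int) : ZMod 998244353) = _
  rw [List.getD_eq_getElem _ _ (by simp [q.isLt])]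
  rw [List.getElem_set]
  split
  · simp_all
  · simp only [List.getElem_replicate]
    have : q.1 ≠ 0 := by omega
    simp [this]

-- mulVec against the start vector picks out column 0
theorem pv_mulVec_v0 (n : Int) (h0 : (0:Nat) < n.toNat)
    (N : Matrix (Fin n.toNat) (Fin n.toNat) (ZMod 998244353)) (p : Fin n.toNat) :
    N.mulVec (pvToV n ((List.replicate n.toNat 0).set 0 1)) p = N p ⟨0, h0⟩ := by
  rw [Matrix.mulVec, dotProduct]
  calc (∑ q : Fin n.toNat, N p q * pvToV n ((List.replicate n.toNat 0).set 0 1) q)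
      = ∑ q : Fin n.toNat, (if (0:Nat) = q.1 then (1 : ZMod 998244353) else 0) * N p q := by
        apply Finset.sum_congr rfl
        intro q _
        rw [pv_v0_interp n q]
        by_cases h : q.1 = 0 <;> simp [h, mul_comm]
        · omega
  _ = N p ⟨0, h0⟩ := pv_sum_delta _ _ _ h0

-- ===== VERDICT glue =====
theorem pv_main (n : Int) (m : Int) (k : Int) (uv_list : List (Int × Int))
    (hn : 1 ≤ n) (hk : 0 ≤ k)
    (hok : ∀ e ∈ uv_list, 1 - n ≤ e.1 ∧ e.1 ≤ n ∧ 1 - n ≤ e.2 ∧ e.2 ≤ n) :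
    solve n m k uv_list = solve_alt n m k uv_list := by
  have h0 : (0 : Nat) < n.toNat := by omega
  have hr0 : ((List.replicate n.toNat (0:Int)).set 0 1).length = n.toNat := by simp
  set M := pvToM n (pvMatEdges n uv_list) with hM
  -- reduce A to the k-th iterate
  have hsolve : solve n m k uv_list
      = (pvIterA n uv_list ((List.replicate n.toNat 0).set 0 1) k.toNat).getD 0 0 := by
    unfold solve pvDpA
    rw [PySem.List.pyRange_one]
    simp only [List.foldl_map, zero_add, Int.toNat_natCast, Int.sub_zero]
    have hK1 : (k + 1).toNat = k.toNat + 1 := by omega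
    rw [hK1]
    obtain ⟨hl, hg⟩ := pv_table n uv_list k.toNat ((List.replicate n.toNat (0:Int)).set 0 1)
        k.toNat (le_refl _)
    rw [hl]
    simp only [Nat.add_sub_cancel]
    rw [hg]
  have hA : ((solve n m k uv_list : Int) : ZMod 998244353)
      = (M ^ k.toNat) ⟨0, h0⟩ ⟨0, h0⟩ := by
    rw [hsolve]
    have hv : (((pvIterA n uv_list ((List.replicate n.toNat 0).set 0 1) k.toNat).getD 0 0 : Int)
        : ZMod 998244353)
        = pvToV n (pvIterA n uv_list ((List.replicate n.toNat 0).set 0 1) k.toNat) ⟨0, h0⟩ := rfl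
    rw [hv, pv_iterA_interp n uv_list _ hr0 hn hok k.toNat, pv_mulVec_v0 n h0]
  -- the two half exponents
  set a := (k - PySem.Int.floordiv k 2).toNat with ha
  set b := (PySem.Int.floordiv k 2).toNat with hb
  have hfd : PySem.Int.floordiv k 2 = k / 2 := PySem.Int.floordiv_eq_ediv_of_pos (by norm_num)
  have hab : a + b = k.toNat := by rw [ha, hb, hfd]; omega
  -- B's value as a matrix entry
  have hhalf : ∀ (d : Nat) (p : Fin n.toNat), pvToV n (pvHalf n d uv_list) p
      = (M ^ d) p ⟨0, h0⟩ := by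
    intro d p
    rw [pv_half_eq_iter, pv_iterA_interp n uv_list _ hr0 hn hok d, pv_mulVec_v0 n h0]
  have hlenL : (pvHalf n a uv_list).length = n.toNat := by
    rw [pv_half_eq_iter]; exact pvIterA_len n uv_list _ a hr0
  have hlenR : (pvHalf n b uv_list).length = n.toNat := by
    rw [pv_half_eq_iter]; exact pvIterA_len n uv_list _ b hr0
  have hsymM : ∀ p q : Fin n.toNat, M p q = M q p := pv_matEdges_symm n uv_list hok
  have hsymPow : ∀ p : Fin n.toNat, (M ^ a) p ⟨0, h0⟩ = (M ^ a) ⟨0, h0⟩ p := by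
    intro p
    have hMT : M.transpose = M := by
      apply Matrix.ext; intro i j; rw [Matrix.transpose_apply]; exact hsymM j i
    have : (M ^ a).transpose = M ^ a := by
      rw [Matrix.transpose_pow, hMT]
    calc (M ^ a) p ⟨0, h0⟩ = (M ^ a).transpose ⟨0, h0⟩ p := rfl
    _ = (M ^ a) ⟨0, h0⟩ p := by rw [this]
  have hB : (((List.zipWith (fun x y => x * y)
        (pvHalf n a uv_list) (pvHalf n b uv_list)).sum : Int) : ZMod 998244353)
      = (M ^ k.toNat) ⟨0, h0⟩ ⟨0, h0⟩ := by
    rw [pv_zip_sum, hlenL, hlenR, Nat.min_self, pv_sum_range_cast,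
      ← Fin.sum_univ_eq_sum_range (fun i =>
        (((pvHalf n a uv_list).getD i 0 * (pvHalf n b uv_list).getD i 0 : Int) : ZMod 998244353))]
    have hterm : ∀ p : Fin n.toNat,
        (((pvHalf n a uv_list).getD p.1 0 * (pvHalf n b uv_list).getD p.1 0 : Int)
          : ZMod 998244353)
        = (M ^ a) ⟨0, h0⟩ p * (M ^ b) p ⟨0, h0⟩ := by
      intro p
      push_cast
      have h1 : ((((pvHalf n a uv_list).getD p.1 0 : Int)) : ZMod 998244353)
          = pvToV n (pvHalf n a uv_list) p := rfl
      have h2 : ((((pvHalf n b uv_list).getD p.1 0 : Int)) : ZMod 998244353)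
          = pvToV n (pvHalf n b uv_list) p := rfl
      rw [h1, h2, hhalf a p, hhalf b p, hsymPow p]
    calc (∑ p : Fin n.toNat,
          (((pvHalf n a uv_list).getD p.1 0 * (pvHalf n b uv_list).getD p.1 0 : Int)
            : ZMod 998244353))
        = ∑ p : Fin n.toNat, (M ^ a) ⟨0, h0⟩ p * (M ^ b) p ⟨0, h0⟩ := by
          apply Finset.sum_congr rfl; intro p _; exact hterm p
    _ = (M ^ a * M ^ b) ⟨0, h0⟩ ⟨0, h0⟩ := by rw [Matrix.mul_apply]
    _ = (M ^ k.toNat) ⟨0, h0⟩ ⟨0, h0⟩ := by rw [← pow_add, hab]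
  -- conclude: both returns are the canonical residue of the same class
  have hcanon : solve n m k uv_list % 998244353 = solve n m k uv_list := by
    rw [hsolve]
    exact pv_iterA_canon n uv_list k.toNat 0
  have hfin := pv_zmod_to_mod _ _ (hA.trans hB.symm)
  unfold solve_alt
  rw [← hfin, hcanon]

-- ===== VERDICT (by name: the statement is the Claim_ definition above) =====
theorem solve_spec : Claim_equal_solve := by
  intro n m k uv_list _hdom hpre
  obtain ⟨hn, hk, hok⟩ := hpre
  exact pv_main n m k uv_list hn hk hok
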